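-- pv_equiv track=rewrite | github.com/leo-ware/leetcode | 35. Search Insert Position.py | foo
-- ===== SOURCE A (Python) =====
-- def foo(l, i):
--     lower = -1
--     upper = len(l)
--
--     for _ in range(1000): # if n > 1000 someone else messed up
--
--         # not found
--         if upper - lower <= 1:
--             return upper
--
--         # binary search
--         guess = lower + (upper - lower) // 2
--         if l[guess] == i:
--             return guess
--         elif l[guess] < i:
--             lower = guess
--         elif l[guess] > i:
--             upper = guess
--
--     raise ValueError("something went wrong")
-- ===== SOURCE B (Python) =====
-- def foo(l, i):
--     # binary search over (lower bound, interval size) instead of A's two mutable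
--     # bounds; same probe index and shrink rule, so the result matches A exactly.
--     def go(lo, size):
--         if size <= 1:
--             return lo + size
--         mid = lo + size // 2
--         if l[mid] < i:
--             return go(mid, size - size // 2)
--         if l[mid] > i:
--             return go(lo, size // 2)
--         return mid
--     return go(-1, len(l) + 1)
-- ===== Notes on version B (the rewrite author's own statement) =====
-- stated objective: alternative
-- what changed: A's capped imperative loop over two mutable bounds (lower, upper) is replaced by a recursive helper over a (lower bound, interval size) state with midpoint lo + size//2 and no iteration cap; the probe index and shrink rule are the same, so results match exactly.
import Mathlib
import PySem

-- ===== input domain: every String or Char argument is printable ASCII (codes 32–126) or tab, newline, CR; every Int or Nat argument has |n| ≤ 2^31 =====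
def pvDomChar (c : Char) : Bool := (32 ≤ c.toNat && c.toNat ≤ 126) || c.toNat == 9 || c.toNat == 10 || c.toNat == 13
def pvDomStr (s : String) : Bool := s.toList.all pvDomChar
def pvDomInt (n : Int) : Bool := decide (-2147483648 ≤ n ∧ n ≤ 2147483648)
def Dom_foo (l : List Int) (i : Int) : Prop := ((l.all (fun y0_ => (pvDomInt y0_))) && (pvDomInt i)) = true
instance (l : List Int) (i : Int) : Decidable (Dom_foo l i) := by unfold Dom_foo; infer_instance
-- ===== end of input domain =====

-- B replaces A's capped two-bound loop by an uncapped recursion over (lower bound, interval size) with the same probe index (alternative decomposition, same cost).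


-- ===== PORT A =====
-- A's for-loop over range(1000) with mutable lower/upper, ported as fuel recursion;
-- fuel 0 is A's `raise ValueError` (unreachable under Pre_foo, which excludes the
-- only lists long enough to exhaust 1000 halvings).  The final `elif l[guess] > i`
-- is the only remaining case after == and <, hence a plain else.
-- l[guess] is always in range on the reachable states, so pyGetD is exact there.
def fooLoop (l : List Int) (i : Int) : Nat → Int → Int → Int
  | 0, _, _ => 0
  | f+1, lower, upper =>
    if upper - lower ≤ 1 then upper
    else
      let guess := lower + PySem.Int.floordiv (upper - lower) 2
      if PySem.List.pyGetD l guess 0 = i then guess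
      else if PySem.List.pyGetD l guess 0 < i then fooLoop l i f guess upper
      else fooLoop l i f lower guess

def foo (l : List Int) (i : Int) : Int := fooLoop l i 1000 (-1) (PySem.List.len l)

-- ===== PORT B =====
-- B's recursive helper `go(lo, size)` over a lower bound and the interval size;
-- terminates because size strictly shrinks.  Same in-range remark on l[mid] as for A.
def fooGo (l : List Int) (i : Int) (lo size : Int) : Int :=
  if size ≤ 1 then lo + size
  else
    let mid := lo + PySem.Int.floordiv size 2
    if PySem.List.pyGetD l mid 0 < i then fooGo l i mid (size - PySem.Int.floordiv size 2)
    else if PySem.List.pyGetD l mid 0 > i then fooGo l i lo (PySem.Int.floordiv size 2)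
    else mid
  termination_by size.toNat
  decreasing_by
    all_goals
      simp only [PySem.Int.floordiv_eq_ediv_of_pos (show (0:Int) < 2 by norm_num)]
      omega

def foo_alt (l : List Int) (i : Int) : Int := fooGo l i (-1) (PySem.List.len l + 1)

-- ===== PRECONDITION & SPEC =====
-- Pre_foo excludes only lists of length ≥ 2^999: these are the only inputs on which
-- A's 1000-iteration cap can be exhausted and raise ValueError (no such list is
-- physically constructible; every practical input is admitted).
def Pre_foo (l : List Int) (i : Int) : Prop := l.length < 5357543035931336604742125245300009052807024058527668037218751941851755255624680612465991894078479290637973364587765734125935726428461570217992288787349287401967283887412115492710537302531185570938977091076523237491790970633699383779582771973038531457285598238843271083830214915826312193418602834034688  -- the literal is 2 ^ 999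
instance (l : List Int) (i : Int) : Decidable (Pre_foo l i) := by unfold Pre_foo; infer_instance
def pvWitness_foo : List Int × Int := ([1, 3, 5], 4)

def Spec_foo (l : List Int) (i : Int) (out : Int) : Prop := out = foo_alt l i
instance (l : List Int) (i : Int) (out : Int) : Decidable (Spec_foo l i out) := by unfold Spec_foo; infer_instance

-- ===== CLAIM (what is proved, stated in full; the proofs are below) =====
def Claim_equal_foo : Prop := ∀ (l : List Int) (i : Int), Dom_foo l i → Pre_foo l i → Spec_foo l i (foo l i)

-- ===== LEMMAS AND PROOFS =====

-- With enough fuel for the current interval width, A's capped loop over (lower, upper)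
-- equals B's recursion over (lower, upper - lower).
lemma fooLoop_eq_fooGo (l : List Int) (i : Int) :
    ∀ (f : Nat) (lower upper : Int), upper - lower ≤ 2 ^ f →
      fooLoop l i (f + 1) lower upper = fooGo l i lower (upper - lower) := by
  intro f
  induction f with
  | zero =>
      intro lower upper h
      rw [fooGo]
      simp [fooLoop, show upper - lower ≤ 1 by omega]
      
  | succ f ih =>
      intro lower upper h
      rw [fooGo, fooLoop]
      have h2 : PySem.Int.floordiv (upper - lower) 2 = (upper - lower) / 2 :=
        PySem.Int.floordiv_eq_ediv_of_pos (by norm_num)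
      rw [pow_succ] at h
      have hP : (0:Int) < 2 ^ f := by positivity
      by_cases h1 : upper - lower ≤ 1
      · simp only [if_pos h1]; omega
      · simp only [if_neg h1, h2]
        by_cases he : PySem.List.pyGetD l (lower + (upper - lower) / 2) 0 = i
        · simp [he]
        · simp only [if_neg he]
          by_cases hlt : PySem.List.pyGetD l (lower + (upper - lower) / 2) 0 < i
          · simp only [if_pos hlt]
            have := ih (lower + (upper - lower) / 2) upper (by omega)
            rw [this]
            congr 1
            omega
          · simp only [if_neg hlt, gt_iff_lt,
              show i < PySem.List.pyGetD l (lower + (upper - lower) / 2) 0 by omega, if_pos]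
            have := ih lower (lower + (upper - lower) / 2) (by omega)
            rw [this]
            congr 1
            omega

-- ===== VERDICT (by name: the statement is the Claim_ definition above) =====
theorem foo_spec : Claim_equal_foo := by
  intro l i _ hpre
  unfold Spec_foo foo foo_alt
  have hL : (2:Nat) ^ 999 = 5357543035931336604742125245300009052807024058527668037218751941851755255624680612465991894078479290637973364587765734125935726428461570217992288787349287401967283887412115492710537302531185570938977091076523237491790970633699383779582771973038531457285598238843271083830214915826312193418602834034688 := by
    set_option maxRecDepth 4096 in decide
  rw [Pre_foo, ← hL] at hpre
  have hlen : ((l.length : Int)) < 2 ^ 999 := by exact_mod_cast hpre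
  have h : PySem.List.len l - (-1) ≤ 2 ^ 999 := by
    simp only [PySem.List.len_eq]; linarith
  have := fooLoop_eq_fooGo l i 999 (-1) (PySem.List.len l) h
  rw [this]
  congr 1
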